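-- pv_equiv track=rewrite | github.com/toasa/tessoku-book | 65b.py | solve_b65
-- ===== SOURCE A (Python) =====
-- def dfs(node, ranks, adjs, visited):
--     if ranks[node] != -1:
--         return ranks[node]
--
--     visited[node] = True
--
--     cur_rank = -1
--     subordinates = adjs[node]
--
--     for s in subordinates:
--         if visited[s]:
--             continue
--
--         subordinate_rank = dfs(s, ranks, adjs, visited)
--         if cur_rank < subordinate_rank:
--             cur_rank = subordinate_rank
--
--     ranks[node] = cur_rank + 1
--     return ranks[node]
--
-- def solve_b65(president, relates):
--     N = len(relates) + 1
--
--     adjs = [[] for _ in range(N+1)]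
--     for r1, r2 in relates:
--         adjs[r1].append(r2)
--         adjs[r2].append(r1)
--
--     ranks = [-1] * (N+1)
--     visited = [False] * (N+1)
--     dfs(president, ranks, adjs, visited)
--
--     return ranks[1:]
-- ===== SOURCE B (Python) =====
-- def solve_b65(president, relates):
--     N = len(relates) + 1
--     adjs = [[] for _ in range(N + 1)]
--     for r1, r2 in relates:
--         adjs[r1].append(r2)
--         adjs[r2].append(r1)
--     ranks = [-1] * (N + 1)
--     visited = [False] * (N + 1)
--     # iterative post-order DFS with an explicit stack of [node, children, next-index, best-child-rank]
--     visited[president] = True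
--     stack = [[president, adjs[president], 0, -1]]
--     while stack:
--         top = stack[-1]
--         node, subs, i, cur = top
--         if i < len(subs):
--             s = subs[i]
--             top[2] = i + 1
--             if visited[s]:
--                 continue
--             if ranks[s] != -1:  # memoised rank available: take it directly
--                 if cur < ranks[s]:
--                     top[3] = ranks[s]
--                 continue
--             visited[s] = True
--             stack.append([s, adjs[s], 0, -1])
--         else:
--             stack.pop()
--             r = cur + 1
--             ranks[node] = r
--             if stack and stack[-1][3] < r:
--                 stack[-1][3] = r
--     return ranks[1:]
-- ===== Notes on version B (the rewrite author's own statement) =====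
-- stated objective: alternative
-- what changed: The recursive memoised DFS is replaced by an iterative post-order DFS over an explicit stack of (node, remaining-children, best-child-rank) frames, resolving rank[node] = 1 + max(child ranks) when a frame is exhausted; the adjacency-list construction and return slice ranks[1:] are unchanged.
import Mathlib
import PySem

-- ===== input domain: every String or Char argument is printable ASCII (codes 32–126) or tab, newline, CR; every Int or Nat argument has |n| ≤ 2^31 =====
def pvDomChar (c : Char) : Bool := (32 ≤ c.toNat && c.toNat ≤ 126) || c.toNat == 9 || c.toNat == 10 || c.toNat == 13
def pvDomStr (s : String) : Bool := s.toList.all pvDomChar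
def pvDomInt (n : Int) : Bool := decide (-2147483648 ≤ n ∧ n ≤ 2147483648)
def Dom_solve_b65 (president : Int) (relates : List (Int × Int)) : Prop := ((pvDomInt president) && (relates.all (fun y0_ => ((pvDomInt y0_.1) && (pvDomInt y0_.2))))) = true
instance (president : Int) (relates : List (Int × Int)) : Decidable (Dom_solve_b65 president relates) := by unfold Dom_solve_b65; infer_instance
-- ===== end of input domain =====

-- B replaces A's recursive memoised DFS by an explicit-stack iterative post-order DFS (same adjacency
-- construction, same traversal order); objective: alternative decomposition, return value identical.

-- ===== PORT A =====

-- adjs[r1].append(r2); adjs[r2].append(r1)  (IndexError → none)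
def pvBuildAdjA (relates : List (Int × Int)) (adjs : List (List Int)) : Option (List (List Int)) :=
  match relates with
  | [] => some adjs
  | (a, b) :: rest =>
    match PySem.List.pyGet? adjs a with
    | none => none
    | some la =>
      match PySem.List.pySet? adjs a (la ++ [b]) with
      | none => none
      | some adjs1 =>
        match PySem.List.pyGet? adjs1 b with
        | none => none
        | some lb =>
          match PySem.List.pySet? adjs1 b (lb ++ [a]) with
          | none => none
          | some adjs2 => pvBuildAdjA rest adjs2

-- the 'for s in subordinates' loop of dfs; 'child' is the recursive dfs call at the loop's fuel
def pvDfsALoop (child : Int → List Int → List Bool → Option (Int × List Int × List Bool)) :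
    List Int → Int → List Int → List Bool → Option (Int × List Int × List Bool)
  | [], cur, ranks, visited => some (cur, ranks, visited)
  | s :: rest, cur, ranks, visited =>
    match PySem.List.pyGet? visited s with
    | none => none
    | some true => pvDfsALoop child rest cur ranks visited
    | some false =>
      match child s ranks visited with
      | none => none
      | some (r, ranks', vis') => pvDfsALoop child rest (if cur < r then r else cur) ranks' vis'

-- the recursive dfs of A (fuel only totalises: the real recursion depth is bounded by the node count)
def pvDfsA (adjs : List (List Int)) : Nat → Int → List Int → List Bool →
    Option (Int × List Int × List Bool)
  | 0, _, _, _ => none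
  | f + 1, node, ranks, visited =>
    match PySem.List.pyGet? ranks node with
    | none => none
    | some r =>
      if r ≠ -1 then some (r, ranks, visited)
      else
        match PySem.List.pySet? visited node true with
        | none => none
        | some vis1 =>
          match PySem.List.pyGet? adjs node with
          | none => none
          | some subs =>
            match pvDfsALoop (fun a b c => pvDfsA adjs f a b c) subs (-1) ranks vis1 with
            | none => none
            | some (cur, ranks1, vis2) =>
              match PySem.List.pySet? ranks1 node (cur + 1) with
              | none => none
              | some ranks2 => some (cur + 1, ranks2, vis2)

def solve_b65 (president : Int) (relates : List (Int × Int)) : List Int :=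
  let N : Nat := relates.length + 1
  match pvBuildAdjA relates (List.replicate (N + 1) []) with
  | none => []
  | some adjs =>
    match pvDfsA adjs (relates.length + 4) president
        (List.replicate (N + 1) (-1)) (List.replicate (N + 1) false) with
    | none => []
    | some (_, ranksF, _) => PySem.List.slice ranksF (some 1) none

-- ===== PORT B =====

-- B builds the adjacency lists with the same loop as A
def pvBuildAdjB (relates : List (Int × Int)) (adjs : List (List Int)) : Option (List (List Int)) :=
  match relates with
  | [] => some adjs
  | (a, b) :: rest =>
    match PySem.List.pyGet? adjs a with
    | none => none
    | some la =>
      match PySem.List.pySet? adjs a (la ++ [b]) with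
      | none => none
      | some adjs1 =>
        match PySem.List.pyGet? adjs1 b with
        | none => none
        | some lb =>
          match PySem.List.pySet? adjs1 b (lb ++ [a]) with
          | none => none
          | some adjs2 => pvBuildAdjB rest adjs2

-- largest adjacency-list length (only used by the termination measure of the machine)
def pvMaxAdj (adjs : List (List Int)) : Nat :=
  adjs.foldl (fun acc l => max acc l.length) 0

-- weight of a stack of frames (fuel, node, remaining children, best child rank); termination measure
def pvStackW (C : Nat) : List (Nat × Int × List Int × Int) → Nat
  | [] => 0
  | f :: K => C ^ f.1 * (f.2.2.1.length + 1) + pvStackW C K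

-- the three decrease facts the machine's termination needs (named so the proofs are not inlined)
theorem pvW_pop (C : Nat) (f fp : Nat) (node p cur cp x : Int) (sp : List Int)
    (K : List (Nat × Int × List Int × Int)) (hC : 0 < C) :
    pvStackW C ((fp, p, sp, x) :: K) < pvStackW C ((f, node, ([] : List Int), cur) :: (fp, p, sp, cp) :: K) := by
  have h1 : 0 < C ^ f := Nat.pow_pos hC
  simp [pvStackW]; omega

theorem pvW_skip (C : Nat) (f : Nat) (node s cur x : Int) (rest : List Int)
    (K : List (Nat × Int × List Int × Int)) (hC : 0 < C) :
    pvStackW C ((f, node, rest, x) :: K) < pvStackW C ((f, node, s :: rest, cur) :: K) := by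
  have h1 : 0 < C ^ f := Nat.pow_pos hC
  have h2 : C ^ f * (rest.length + 1) < C ^ f * (rest.length + 1 + 1) :=
    Nat.mul_lt_mul_of_pos_left (by omega) h1
  simp [pvStackW]; omega

theorem pvW_push (C : Nat) (f' : Nat) (node s cur cur0 : Int) (subsS rest : List Int)
    (K : List (Nat × Int × List Int × Int)) (hlen : subsS.length + 1 < C) :
    pvStackW C ((f', s, subsS, -1) :: (f' + 1, node, rest, cur) :: K) <
      pvStackW C ((f' + 1, node, s :: rest, cur0) :: K) := by
  have h1 : 0 < C ^ f' := Nat.pow_pos (by omega)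
  have h2 : C ^ f' * (subsS.length + 1) < C ^ f' * C :=
    Nat.mul_lt_mul_of_pos_left hlen h1
  have h3 : C ^ (f' + 1) = C ^ f' * C := pow_succ C f'
  have h4 : C ^ (f' + 1) * (rest.length + 1 + 1) =
      C ^ (f' + 1) * (rest.length + 1) + C ^ (f' + 1) := by ring
  simp [pvStackW]; omega

theorem pvAdjLen (adjs : List (List Int)) (s : Int) (subsS : List Int)
    (h : PySem.List.pyGet? adjs s = some subsS) : subsS.length + 1 < pvMaxAdj adjs + 2 := by
  have hmem : subsS ∈ adjs := PySem.List.mem_of_pyGet?_eq_some adjs h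
  have := (PySem.List.le_foldl_max_nat adjs List.length 0).2 subsS hmem
  simp only [pvMaxAdj]
  omega

-- the while loop of B: explicit-stack post-order DFS (frame fuel only totalises the push step)
def pvRunB (adjs : List (List Int)) (stack : List (Nat × Int × List Int × Int))
    (ranks : List Int) (visited : List Bool) : Option (List Int × List Bool) :=
  match stack with
  | [] => some (ranks, visited)
  | (_f, node, [], cur) :: K =>
    match PySem.List.pySet? ranks node (cur + 1) with
    | none => none
    | some ranks' =>
      match K with
      | [] => some (ranks', visited)
      | (fp, p, sp, cp) :: K' =>
        pvRunB adjs ((fp, p, sp, if cp < cur + 1 then cur + 1 else cp) :: K') ranks' visited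
  | (f, node, s :: rest, cur) :: K =>
    match PySem.List.pyGet? visited s with
    | none => none
    | some true => pvRunB adjs ((f, node, rest, cur) :: K) ranks visited
    | some false =>
      match f with
      | 0 => none
      | f' + 1 =>
        match PySem.List.pyGet? ranks s with
        | none => none
        | some r =>
          if r ≠ -1 then
            pvRunB adjs ((f' + 1, node, rest, if cur < r then r else cur) :: K) ranks visited
          else
            match PySem.List.pySet? visited s true with
            | none => none
            | some vis' =>
              match hadj : PySem.List.pyGet? adjs s with
              | none => none
              | some subsS =>
                pvRunB adjs ((f', s, subsS, -1) :: (f' + 1, node, rest, cur) :: K) ranks vis'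
termination_by pvStackW (pvMaxAdj adjs + 2) stack
decreasing_by
  · exact pvW_pop _ _ fp node p cur cp _ sp K' (by omega)
  · exact pvW_skip _ f node s cur cur rest K (by omega)
  · exact pvW_skip _ (f' + 1) node s cur (if cur < r then r else cur) rest K (by omega)
  · exact pvW_push _ f' node s cur cur subsS rest K (pvAdjLen adjs s subsS hadj)

def solve_b65_alt (president : Int) (relates : List (Int × Int)) : List Int :=
  let N : Nat := relates.length + 1
  match pvBuildAdjB relates (List.replicate (N + 1) []) with
  | none => []
  | some adjs =>
    match PySem.List.pySet? (List.replicate (N + 1) false) president true with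
    | none => []
    | some vis1 =>
      match PySem.List.pyGet? adjs president with
      | none => []
      | some subs0 =>
        match pvRunB adjs [(relates.length + 3, president, subs0, -1)]
            (List.replicate (N + 1) (-1)) vis1 with
        | none => []
        | some (ranksF, _) => PySem.List.slice ranksF (some 1) none

-- ===== PRECONDITION & SPEC =====
-- Pre_ = exactly the inputs on which A raises no IndexError: president and every related pair must be
-- a valid (possibly negative) Python index into the N+1 = len(relates)+2 sized arrays.
def Pre_solve_b65 (president : Int) (relates : List (Int × Int)) : Prop :=
  PySem.Raise.InRange (relates.length + 2) president ∧
    ∀ p ∈ relates, PySem.Raise.InRange (relates.length + 2) p.1 ∧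
      PySem.Raise.InRange (relates.length + 2) p.2

instance (president : Int) (relates : List (Int × Int)) : Decidable (Pre_solve_b65 president relates) := by
  unfold Pre_solve_b65; infer_instance

def pvWitness_solve_b65 : Int × (List (Int × Int)) := (1, [(1, 2)])

def Spec_solve_b65 (president : Int) (relates : List (Int × Int)) (out : List Int) : Prop :=
  out = solve_b65_alt president relates
instance (president : Int) (relates : List (Int × Int)) (out : List Int) : Decidable (Spec_solve_b65 president relates out) := by
  unfold Spec_solve_b65; infer_instance

-- ===== CLAIM (what is proved, stated in full; the proofs are below) =====
def Claim_equal_solve_b65 : Prop := ∀ (president : Int) (relates : List (Int × Int)), Dom_solve_b65 president relates → Pre_solve_b65 president relates → Spec_solve_b65 president relates (solve_b65 president relates)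

-- ===== LEMMAS AND PROOFS =====

theorem pvSetLen {α : Type} (xs ys : List α) (i : Int) (v : α)
    (h : PySem.List.pySet? xs i v = some ys) : ys.length = xs.length := by
  have hy : ys = PySem.List.pySetD xs i v := by simp [PySem.List.pySetD, h]
  rw [hy]; exact PySem.List.length_pySetD xs i v

theorem pvBuild_eq (relates : List (Int × Int)) :
    ∀ adjs : List (List Int), pvBuildAdjB relates adjs = pvBuildAdjA relates adjs := by
  induction relates with
  | nil => intro adjs; rfl
  | cons p rest ih =>
    intro adjs
    obtain ⟨a, b⟩ := p
    simp only [pvBuildAdjA, pvBuildAdjB, ih]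

theorem pvBuildLen (relates : List (Int × Int)) :
    ∀ adjs adjs' : List (List Int), pvBuildAdjA relates adjs = some adjs' →
      adjs'.length = adjs.length := by
  induction relates with
  | nil =>
    intro adjs adjs' h
    simp only [pvBuildAdjA, Option.some.injEq] at h
    subst h; rfl
  | cons p rest ih =>
    intro adjs adjs' h
    obtain ⟨a, b⟩ := p
    simp only [pvBuildAdjA] at h
    cases h1 : PySem.List.pyGet? adjs a with
    | none => simp only [h1] at h; simp at h
    | some la =>
      simp only [h1] at h
      cases h2 : PySem.List.pySet? adjs a (la ++ [b]) with
      | none => simp only [h2] at h; simp at h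
      | some adjs1 =>
        simp only [h2] at h
        cases h3 : PySem.List.pyGet? adjs1 b with
        | none => simp only [h3] at h; simp at h
        | some lb =>
          simp only [h3] at h
          cases h4 : PySem.List.pySet? adjs1 b (lb ++ [a]) with
          | none => simp only [h4] at h; simp at h
          | some adjs2 =>
            simp only [h4] at h
            rw [ih adjs2 adjs' h, pvSetLen adjs1 adjs2 b _ h4, pvSetLen adjs adjs1 a _ h2]

-- one-step equation of pvDfsA at positive fuel
theorem pvDfsA_succ (adjs : List (List Int)) (f : Nat) (node : Int) (ranks : List Int)
    (visited : List Bool) :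
    pvDfsA adjs (f + 1) node ranks visited =
      match PySem.List.pyGet? ranks node with
      | none => none
      | some r =>
        if r ≠ -1 then some (r, ranks, visited)
        else
          match PySem.List.pySet? visited node true with
          | none => none
          | some vis1 =>
            match PySem.List.pyGet? adjs node with
            | none => none
            | some subs =>
              match pvDfsALoop (fun a b c => pvDfsA adjs f a b c) subs (-1) ranks vis1 with
              | none => none
              | some (cur, ranks1, vis2) =>
                match PySem.List.pySet? ranks1 node (cur + 1) with
                | none => none
                | some ranks2 => some (cur + 1, ranks2, vis2) := rfl

-- the machine on a frame (f, node, subs, cur) runs A's loop on subs, then pops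
theorem pvSim (adjs : List (List Int)) (f : Nat) :
    ∀ (subs : List Int) (node cur : Int) (ranks : List Int) (visited : List Bool)
      (K : List (Nat × Int × List Int × Int)),
      pvRunB adjs ((f, node, subs, cur) :: K) ranks visited =
        match pvDfsALoop (fun a b c => pvDfsA adjs f a b c) subs cur ranks visited with
        | none => none
        | some (c, r1, v1) => pvRunB adjs ((f, node, [], c) :: K) r1 v1 := by
  induction f using Nat.strong_induction_on with
  | _ f ihf =>
  intro subs
  induction subs with
  | nil => intro node cur ranks visited K; rfl
  | cons s rest ih =>
    intro node cur ranks visited K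
    rw [pvRunB.eq_def]
    simp only [pvDfsALoop]
    cases hv : PySem.List.pyGet? visited s with
    | none => rfl
    | some bv =>
      cases bv with
      | true => exact ih node cur ranks visited K
      | false =>
        cases f with
        | zero => rfl
        | succ f' =>
          dsimp only
          rw [pvDfsA_succ]
          cases hr : PySem.List.pyGet? ranks s with
          | none => rfl
          | some r =>
            dsimp only
            by_cases hrr : r = -1
            · subst hrr
              simp only [if_neg (by decide : ¬ ((-1 : Int) ≠ -1))]
              cases hvs : PySem.List.pySet? visited s true with
              | none => rfl
              | some vis' =>
                dsimp only
                cases hadj : PySem.List.pyGet? adjs s with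
                | none => rfl
                | some subsS =>
                  dsimp only
                  rw [ihf f' (Nat.lt_succ_self f') subsS s (-1) ranks vis'
                    ((f' + 1, node, rest, cur) :: K)]
                  cases hd : pvDfsALoop (fun a b c => pvDfsA adjs f' a b c) subsS (-1) ranks vis' with
                  | none => rfl
                  | some t =>
                    obtain ⟨c, r1, v1⟩ := t
                    dsimp only
                    rw [pvRunB.eq_def]
                    dsimp only
                    cases hs2 : PySem.List.pySet? r1 s (c + 1) with
                    | none => rfl
                    | some r2 => exact ih node (if cur < c + 1 then c + 1 else cur) r2 v1 K
            · rw [if_pos hrr, if_pos hrr]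
              dsimp only
              exact ih node (if cur < r then r else cur) ranks visited K

-- ===== VERDICT (by name: the statement is the Claim_ definition above) =====
theorem solve_b65_spec : Claim_equal_solve_b65 := by
  intro president relates _hdom _hpre
  unfold Spec_solve_b65 solve_b65 solve_b65_alt
  simp only [pvBuild_eq]
  cases hb : pvBuildAdjA relates (List.replicate (relates.length + 1 + 1) []) with
  | none => rfl
  | some adjs =>
  have hlen : adjs.length = relates.length + 2 := by
    have := pvBuildLen relates _ adjs hb
    simpa using this
  dsimp only
  rw [show relates.length + 4 = (relates.length + 3) + 1 from rfl, pvDfsA_succ]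
  cases hr : PySem.List.pyGet? (List.replicate (relates.length + 1 + 1) (-1 : Int)) president with
  | none =>
    have hnr : ¬ PySem.Raise.InRange (relates.length + 1 + 1) president := by
      have := (PySem.List.pyGet?_eq_none_iff
        (xs := List.replicate (relates.length + 1 + 1) (-1 : Int)) (i := president)).mp hr
      simpa using this
    have hv : PySem.List.pySet? (List.replicate (relates.length + 1 + 1) false) president true
        = none := by
      rw [PySem.List.pySet?_eq_none_iff]
      simpa using hnr
    rw [hv]
  | some r =>
  dsimp only
  have hrval : r = -1 := by
    have := PySem.List.mem_of_pyGet?_eq_some _ hr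
    exact List.eq_of_mem_replicate this
  subst hrval
  simp only [if_neg (by decide : ¬ ((-1 : Int) ≠ -1))]
  have hin : PySem.Raise.InRange (relates.length + 1 + 1) president := by
    by_contra hc
    have : PySem.List.pyGet? (List.replicate (relates.length + 1 + 1) (-1 : Int)) president
        = none := by
      rw [PySem.List.pyGet?_eq_none_iff]
      simpa using hc
    rw [this] at hr; cases hr
  cases hvs : PySem.List.pySet? (List.replicate (relates.length + 1 + 1) false) president true with
  | none =>
    exfalso
    rw [PySem.List.pySet?_eq_none_iff] at hvs
    simp at hvs
    exact hvs hin
  | some vis1 =>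
  dsimp only
  cases hadj : PySem.List.pyGet? adjs president with
  | none =>
    exfalso
    rw [PySem.List.pyGet?_eq_none_iff, hlen] at hadj
    exact hadj hin
  | some subs0 =>
  dsimp only
  rw [pvSim adjs (relates.length + 3) subs0 president (-1)
    (List.replicate (relates.length + 1 + 1) (-1)) vis1 []]
  cases hd : pvDfsALoop (fun a b c => pvDfsA adjs (relates.length + 3) a b c) subs0 (-1)
      (List.replicate (relates.length + 1 + 1) (-1)) vis1 with
  | none => rfl
  | some t =>
  obtain ⟨c, r1, v1⟩ := t
  dsimp only
  rw [pvRunB.eq_def]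
  dsimp only
  cases hs2 : PySem.List.pySet? r1 president (c + 1) with
  | none => rfl
  | some r2 => rfl
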